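-- pv_equiv track=rewrite | github.com/locdacknownothing/bait-web-demo | bait/demo/submodules/ner/process.py | io2iob2
-- ===== SOURCE A (Python) =====
-- def io2iob2(io_tags):
--     iob2_tags = []
--     previous_tag = "O"  # Initial previous tag
--     for tag in io_tags:
--         if tag == "O":
--             iob2_tags.append("O")
--             previous_tag = "O"  # Reset previous tag
--         else:
--             if previous_tag == tag:
--                 # If the same entity follows, it's "I-<entity>"
--                 iob2_tags.append(f"I-{tag}")
--             else:
--                 # Otherwise, it's "B-<entity>"
--                 iob2_tags.append(f"B-{tag}")
--             previous_tag = tag  # Update the previous tag to current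
--     return iob2_tags
-- ===== SOURCE B (Python) =====
-- def io2iob2(io_tags):
--     # Group-then-expand: scan maximal runs of equal tags; an 'O' run stays 'O's,
--     # an entity run becomes one B-<tag> followed by I-<tag>s.
--     out = []
--     i = 0
--     n = len(io_tags)
--     while i < n:
--         tag = io_tags[i]
--         j = i + 1
--         while j < n and io_tags[j] == tag:
--             j += 1
--         run = j - i
--         if tag == "O":
--             out.extend(["O"] * run)
--         else:
--             out.append("B-" + tag)
--             out.extend(["I-" + tag] * (run - 1))
--         i = j
--     return out
-- ===== Notes on version B (the rewrite author's own statement) =====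
-- stated objective: alternative
-- what changed: Replaces the element-wise stateful scan with previous_tag by a run-grouping pass: each maximal run of equal tags is emitted at once (an O-run as O's, an entity run as one B- plus I-'s).
import Mathlib
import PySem

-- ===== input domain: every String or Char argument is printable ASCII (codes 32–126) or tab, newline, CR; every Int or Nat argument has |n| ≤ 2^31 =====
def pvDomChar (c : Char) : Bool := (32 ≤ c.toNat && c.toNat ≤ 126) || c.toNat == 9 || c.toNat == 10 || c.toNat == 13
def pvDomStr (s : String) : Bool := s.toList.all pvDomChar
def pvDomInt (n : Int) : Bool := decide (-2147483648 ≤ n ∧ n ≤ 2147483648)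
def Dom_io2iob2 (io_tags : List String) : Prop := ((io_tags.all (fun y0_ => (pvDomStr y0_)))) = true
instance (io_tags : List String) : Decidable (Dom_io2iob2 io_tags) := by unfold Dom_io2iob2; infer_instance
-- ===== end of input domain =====

-- B replaces A's element-wise scan with previous_tag by a run-grouping pass (alternative decomposition, same cost).

-- ===== PORT A =====
-- A: fold over the tags carrying (iob2_tags, previous_tag).
def io2iob2 (io_tags : List String) : List String :=
  (io_tags.foldl (fun (st : List String × String) tag =>
    if tag == "O" then (st.1 ++ ["O"], "O")
    else if st.2 == tag then (st.1 ++ ["I-" ++ tag], tag)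
    else (st.1 ++ ["B-" ++ tag], tag)) ([], "O")).1

-- ===== PORT B =====
-- B: peel one maximal run of equal tags at a time (the inner while = takeWhile/dropWhile) and expand it.
def io2iob2_alt (io_tags : List String) : List String :=
  match io_tags with
  | [] => []
  | tag :: rest =>
    let run := rest.takeWhile (· == tag)
    let rest' := rest.dropWhile (· == tag)
    (if tag == "O" then List.replicate (run.length + 1) "O"
     else ("B-" ++ tag) :: List.replicate run.length ("I-" ++ tag)) ++ io2iob2_alt rest'
termination_by io_tags.length
decreasing_by
  have := List.length_dropWhile_le (p := (· == tag)) (l := rest)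
  simp only [List.length_cons]
  exact Nat.lt_succ_of_le this

-- ===== PRECONDITION & SPEC =====
def Spec_io2iob2 (io_tags : List String) (out : List String) : Prop := out = io2iob2_alt io_tags
instance (io_tags : List String) (out : List String) : Decidable (Spec_io2iob2 io_tags out) := by unfold Spec_io2iob2; infer_instance

-- ===== CLAIM (what is proved, stated in full; the proofs are below) =====
def Claim_equal_io2iob2 : Prop := ∀ (io_tags : List String), Dom_io2iob2 io_tags → Spec_io2iob2 io_tags (io2iob2 io_tags)

-- ===== LEMMAS AND PROOFS =====

-- A's loop, in recursive form (proved equal to the foldl below).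
def goA : String → List String → List String
  | _, [] => []
  | prev, tag :: rest =>
    if tag == "O" then "O" :: goA "O" rest
    else if prev == tag then ("I-" ++ tag) :: goA tag rest
    else ("B-" ++ tag) :: goA tag rest

theorem foldl_eq_goA (l : List String) (acc : List String) (prev : String) :
    (l.foldl (fun (st : List String × String) tag =>
      if tag == "O" then (st.1 ++ ["O"], "O")
      else if st.2 == tag then (st.1 ++ ["I-" ++ tag], tag)
      else (st.1 ++ ["B-" ++ tag], tag)) (acc, prev)).1 = acc ++ goA prev l := by
  induction l generalizing acc prev with
  | nil => simp [goA]
  | cons tag rest ih =>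
    simp only [List.foldl_cons, goA]
    by_cases h1 : tag == "O"
    · rw [if_pos h1, if_pos h1, ih]; simp
    · by_cases h2 : prev == tag
      · rw [if_neg h1, if_neg h1, if_pos h2, if_pos h2, ih]; simp
      · rw [if_neg h1, if_neg h1, if_neg h2, if_neg h2, ih]; simp

-- An "O" run: goA emits "O" per element regardless of prev.
theorem goA_O_run (ts : List String) (rest : List String) (prev : String)
    (h : ∀ x ∈ ts, x = "O") :
    goA prev (("O" :: ts) ++ rest) = List.replicate (ts.length + 1) "O" ++ goA "O" rest := by
  induction ts generalizing prev with
  | nil => simp [goA]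
  | cons t ts ih =>
    have ht : t = "O" := h t (by simp)
    subst ht
    have h' : ∀ x ∈ ts, x = "O" := fun x hx => h x (by simp [hx])
    have key := ih "O" h'
    simp only [List.cons_append, goA, beq_self_eq_true, if_true] at key ⊢
    simp [key, List.replicate_succ]

-- Inside an entity run, every further equal tag becomes an I-.
theorem goA_I_run (tag : String) (ts : List String) (rest : List String)
    (hO : tag ≠ "O") (h : ∀ x ∈ ts, x = tag) :
    goA tag (ts ++ rest) = List.replicate ts.length ("I-" ++ tag) ++ goA tag rest := by
  induction ts with
  | nil => simp
  | cons t ts ih =>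
    have ht : t = tag := h t (by simp)
    subst t
    have h' : ∀ x ∈ ts, x = tag := fun x hx => h x (by simp [hx])
    simp only [List.cons_append, goA]
    rw [if_neg (by simpa using hO), if_pos (by simp)]
    simp [ih h', List.replicate_succ]

-- An entity run: one B-, then I-'s, provided prev ≠ tag.
theorem goA_ent_run (tag : String) (ts : List String) (rest : List String) (prev : String)
    (hO : tag ≠ "O") (hp : prev ≠ tag) (h : ∀ x ∈ ts, x = tag) :
    goA prev ((tag :: ts) ++ rest)
      = ("B-" ++ tag) :: (List.replicate ts.length ("I-" ++ tag) ++ goA tag rest) := by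
  simp only [List.cons_append, goA]
  rw [if_neg (by simpa using hO), if_neg (by simpa using hp)]
  rw [goA_I_run tag ts rest hO h]

-- The head of dropWhile does not satisfy the predicate.
theorem head_dropWhile_not {α : Type} (p : α → Bool) (l : List α) :
    ∀ t ∈ (l.dropWhile p).head?, p t = false := by
  induction l with
  | nil => simp
  | cons a l ih =>
    intro t ht
    by_cases hpa : p a
    · exact ih t (by simpa [List.dropWhile_cons, hpa] using ht)
    · simp [hpa] at ht
      cases ht
      simpa using hpa

-- One-step unfolding of io2iob2_alt at a cons.
theorem alt_cons (tag : String) (rest : List String) :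
    io2iob2_alt (tag :: rest)
      = (if tag == "O" then List.replicate ((rest.takeWhile (· == tag)).length + 1) "O"
         else ("B-" ++ tag) :: List.replicate (rest.takeWhile (· == tag)).length ("I-" ++ tag))
        ++ io2iob2_alt (rest.dropWhile (· == tag)) := by
  rw [io2iob2_alt.eq_def]

-- goA equals B whenever prev cannot extend the head as an I- (prev = "O" or head ≠ prev).
theorem goA_eq_alt_aux (n : Nat) : ∀ (l : List String), l.length ≤ n → ∀ prev,
    (prev = "O" ∨ ∀ t ∈ l.head?, t ≠ prev) → goA prev l = io2iob2_alt l := by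
  induction n with
  | zero =>
    intro l hl prev _
    have hnil : l = [] := List.eq_nil_of_length_eq_zero (Nat.le_zero.mp hl)
    subst hnil
    simp [goA, io2iob2_alt]
  | succ n ihn =>
    intro l hl prev hprev
    cases l with
    | nil => simp [goA, io2iob2_alt]
    | cons tag rest =>
      have htw : ∀ x ∈ rest.takeWhile (· == tag), x = tag := fun x hx => by
        have := List.mem_takeWhile_imp hx; simpa using this
      have hsplit : tag :: rest = (tag :: rest.takeWhile (· == tag)) ++ rest.dropWhile (· == tag) := by
        simp [List.takeWhile_append_dropWhile]
      have hd : ∀ t ∈ (rest.dropWhile (· == tag)).head?, t ≠ tag := by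
        intro t ht
        have := head_dropWhile_not (· == tag) rest t ht
        simpa using this
      have hlen : (rest.dropWhile (· == tag)).length ≤ n := by
        have h1 := List.length_dropWhile_le (p := (· == tag)) (l := rest)
        have h2 : rest.length ≤ n := Nat.le_of_succ_le_succ (by simpa using hl)
        omega
      by_cases hO : tag = "O"
      · subst hO
        rw [alt_cons]
        simp only [beq_self_eq_true, if_true]
        conv_lhs => rw [hsplit]
        rw [goA_O_run _ _ _ htw, ihn _ hlen "O" (Or.inl rfl)]
      · have hp : prev ≠ tag := by
          rcases hprev with h1 | h1
          · subst h1; exact fun e => hO e.symm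
          · exact fun e => h1 tag (by simp) e.symm
        rw [alt_cons, if_neg (by simpa using hO)]
        conv_lhs => rw [hsplit]
        rw [goA_ent_run tag _ _ prev hO hp htw, ihn _ hlen tag (Or.inr hd)]
        simp

-- ===== VERDICT (by name: the statement is the Claim_ definition above) =====
theorem io2iob2_spec : Claim_equal_io2iob2 := by
  intro l _
  unfold Spec_io2iob2 io2iob2
  rw [foldl_eq_goA]
  simpa using goA_eq_alt_aux l.length l (le_refl _) "O" (Or.inl rfl)
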